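-- pv_equiv track=rewrite | github.com/washi4/reading-hub | .github/skills/youtube-clipper/scripts/dedupe_rolling_captions.py | dedupe_ngrams
-- ===== SOURCE A (Python) =====
-- def dedupe_ngrams(words: list[str], max_n: int = 30) -> list[str]:
--     """Collapse adjacent identical n-grams.
--
--     Loops until no more collapses happen. Tries longer n first so that a
--     6-word repeat is collapsed as one unit instead of as three 2-word repeats
--     (which would over-delete).
--     """
--     changed = True
--     while changed:
--         changed = False
--         for n in range(max_n, 1, -1):
--             out: list[str] = []
--             i = 0
--             while i < len(words):
--                 end1 = i + n
--                 end2 = i + 2 * n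
--                 if end2 <= len(words) and words[i:end1] == words[end1:end2]:
--                     out.extend(words[i:end1])
--                     i = end2
--                     changed = True
--                     # keep collapsing if the same phrase repeats further
--                     while i + n <= len(words) and words[i - n:i] == words[i:i + n]:
--                         i += n
--                 else:
--                     out.append(words[i])
--                     i += 1
--             words = out
--     return words
-- ===== SOURCE B (Python) =====
-- def _collapse_pass(words: list[str], n: int) -> list[str]:
--     """One left-to-right greedy pass for a fixed n, using a match-run table.
--
--     run[j] = length of the run of positions j, j+1, ... with words[k] == words[k+n],
--     so "the n-gram at i equals the n-gram at i+n" is the O(1) test run[i] >= n.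
--     The pass collects surviving (start, stop) slices and flattens them at the end.
--     """
--     L = len(words)
--     run = [0] * (L + 1)
--     for j in reversed(range(L)):
--         if j + n < L and words[j] == words[j + n]:
--             run[j] = run[j + 1] + 1
--     keep: list[tuple[int, int]] = []
--     i = 0
--     while i < L:
--         if i + 2 * n <= L and run[i] >= n:
--             keep.append((i, i + n))
--             i += 2 * n
--             while i + n <= L and run[i - n] >= n:
--                 i += n
--         else:
--             keep.append((i, i + 1))
--             i += 1
--     return [w for a, b in keep for w in words[a:b]]
--
--
-- def dedupe_ngrams(words: list[str], max_n: int = 30) -> list[str]: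
--     """Collapse adjacent identical n-grams: sweep n = max_n..2, repeat to fixed point.
--
--     A sweep changed something iff its output differs from its input (every
--     collapse strictly shrinks the list), so no 'changed' flag is threaded.
--     """
--     while True:
--         out = words
--         for n in range(max_n, 1, -1):
--             out = _collapse_pass(out, n)
--         if out == words:
--             return words
--         words = out
-- ===== Notes on version B (the rewrite author's own statement) =====
-- stated objective: alternative
-- what changed: Each n-pass precomputes a right-to-left match-run table (run[j] = length of the run with words[k]==words[k+n]) so every n-gram equality is an O(1) table lookup instead of an O(n) slice comparison, the pass collects surviving (start,stop) slices and flattens them, and the fixed point is detected by comparing the sweep output with its input instead of threading a changed flag.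
import Mathlib
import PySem

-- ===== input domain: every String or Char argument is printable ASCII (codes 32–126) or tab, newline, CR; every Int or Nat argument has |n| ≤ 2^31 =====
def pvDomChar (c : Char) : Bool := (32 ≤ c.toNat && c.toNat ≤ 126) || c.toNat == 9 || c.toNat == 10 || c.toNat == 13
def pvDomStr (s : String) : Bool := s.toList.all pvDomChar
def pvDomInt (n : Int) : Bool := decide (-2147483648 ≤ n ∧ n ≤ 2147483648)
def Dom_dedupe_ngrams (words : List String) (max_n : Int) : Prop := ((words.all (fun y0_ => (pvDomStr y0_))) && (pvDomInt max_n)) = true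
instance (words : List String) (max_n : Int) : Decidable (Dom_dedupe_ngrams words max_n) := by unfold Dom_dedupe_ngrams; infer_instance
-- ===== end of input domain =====

-- B replaces A's O(n) slice comparisons by an O(1) lookup in a per-pass match-run table, collects surviving
-- (start,stop) slices and flattens them, and detects the fixed point by comparing sweep output with input
-- instead of threading a 'changed' flag. The while-loops are ported with ample fuel.

-- ===== PORT A =====
-- inner 'while i + n <= len(words) and words[i-n:i] == words[i:i+n]: i += n'
def pvInnerA (ws : List String) (n : Int) : Nat → Int → Int
  | 0, i => i
  | fuel+1, i =>
    if i + n ≤ (ws.length : Int) ∧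
       PySem.List.slice ws (some (i - n)) (some i) = PySem.List.slice ws (some i) (some (i + n))
    then pvInnerA ws n fuel (i + n) else i

-- the 'while i < len(words)' scan for one n (returns out and the changed flag)
def pvScanA (ws : List String) (n : Int) : Nat → Int → List String → Bool → List String × Bool
  | 0, _, out, changed => (out, changed)
  | fuel+1, i, out, changed =>
    if i < (ws.length : Int) then
      if i + 2*n ≤ (ws.length : Int) ∧
         PySem.List.slice ws (some i) (some (i + n)) = PySem.List.slice ws (some (i + n)) (some (i + 2*n))
      then pvScanA ws n fuel (pvInnerA ws n (ws.length + 1) (i + 2*n))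
             (out ++ PySem.List.slice ws (some i) (some (i + n))) true
      else pvScanA ws n fuel (i + 1) (out ++ [(PySem.List.pyGet? ws i).getD ""]) changed
    else (out, changed)

-- 'for n in range(max_n, 1, -1): …'
def pvSweepA (maxn : Int) (st : List String × Bool) : List String × Bool :=
  (PySem.List.pyRange maxn 1 (-1)).foldl
    (fun st n => pvScanA st.1 n (st.1.length + 1) 0 [] st.2) st

-- 'while changed: …'
def pvLoopA (maxn : Int) : Nat → List String → List String
  | 0, ws => ws
  | fuel+1, ws =>
    let r := pvSweepA maxn (ws, false)
    if r.2 then pvLoopA maxn fuel r.1 else r.1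

def dedupe_ngrams (words : List String) (max_n : Int) : List String :=
  pvLoopA max_n (words.length + 2) words

-- ===== PORT B =====
-- run[j] = run[j+1] + 1 if j + n < L and words[j] == words[j+n] else 0, built right to left (one extra 0 at the end)
def pvCnt (ws : List String) (n : Int) : List Int :=
  (List.range ws.length).foldr
    (fun (j : Nat) acc =>
      (if (j : Int) + n < (ws.length : Int) ∧
          PySem.List.pyGet? ws (j : Int) = PySem.List.pyGet? ws ((j : Int) + n)
       then acc.headD 0 + 1 else 0) :: acc) [0]

-- inner 'while i + n <= L and run[i-n] >= n: i += n'
def pvInnerB (ws : List String) (cnt : List Int) (n : Int) : Nat → Int → Int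
  | 0, i => i
  | fuel+1, i =>
    if i + n ≤ (ws.length : Int) ∧ n ≤ (PySem.List.pyGet? cnt (i - n)).getD 0
    then pvInnerB ws cnt n fuel (i + n) else i

-- the 'while i < L' collection of surviving (start, stop) slices, using the O(1) table test
def pvKeepB (ws : List String) (cnt : List Int) (n : Int) : Nat → Int → List (Int × Int)
  | 0, _ => []
  | fuel+1, i =>
    if i < (ws.length : Int) then
      if i + 2*n ≤ (ws.length : Int) ∧ n ≤ (PySem.List.pyGet? cnt i).getD 0 then
        (i, i + n) :: pvKeepB ws cnt n fuel (pvInnerB ws cnt n (ws.length + 1) (i + 2*n))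
      else (i, i + 1) :: pvKeepB ws cnt n fuel (i + 1)
    else []

-- '[w for a, b in keep for w in words[a:b]]'
def pvPassB (ws : List String) (n : Int) : List String :=
  (pvKeepB ws (pvCnt ws n) n (ws.length + 1) 0).flatMap
    (fun p => PySem.List.slice ws (some p.1) (some p.2))

-- 'out = words; for n in range(max_n, 1, -1): out = _collapse_pass(out, n)'
def pvSweepB (maxn : Int) (ws : List String) : List String :=
  (PySem.List.pyRange maxn 1 (-1)).foldl (fun w n => pvPassB w n) ws

-- 'while True: …; if out == words: return words; words = out'
def pvLoopB (maxn : Int) : Nat → List String → List String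
  | 0, ws => ws
  | fuel+1, ws =>
    let r := pvSweepB maxn ws
    if r = ws then ws else pvLoopB maxn fuel r

def dedupe_ngrams_alt (words : List String) (max_n : Int) : List String :=
  pvLoopB max_n (words.length + 2) words

-- ===== PRECONDITION & SPEC =====
def Spec_dedupe_ngrams (words : List String) (max_n : Int) (out : List String) : Prop := out = dedupe_ngrams_alt words max_n
instance (words : List String) (max_n : Int) (out : List String) : Decidable (Spec_dedupe_ngrams words max_n out) := by unfold Spec_dedupe_ngrams; infer_instance

-- ===== CLAIM (what is proved, stated in full; the proofs are below) =====
def Claim_equal_dedupe_ngrams : Prop := ∀ (words : List String) (max_n : Int), Dom_dedupe_ngrams words max_n → Spec_dedupe_ngrams words max_n (dedupe_ngrams words max_n)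

-- ===== LEMMAS AND PROOFS =====

-- reference run-length: pvRun ws N j = length of the run of positions j, j+1, … with ws[k]? = ws[k+N]?
def pvRun (ws : List String) (N : Nat) (j : Nat) : Nat :=
  if h : j + N < ws.length ∧ ws[j]? = ws[j + N]? then pvRun ws N (j + 1) + 1 else 0
termination_by ws.length - j
decreasing_by omega

lemma pvRun_ge_iff (ws : List String) (N : Nat) (m : Nat) :
    ∀ j, m ≤ pvRun ws N j ↔ ∀ k, k < m → j + k + N < ws.length ∧ ws[j + k]? = ws[j + k + N]? := by
  induction m with
  | zero => intro j; simp
  | succ m ih =>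
    intro j
    rw [pvRun]
    split
    · rename_i h
      constructor
      · intro hle k hk
        rcases Nat.lt_or_ge k 1 with hk0 | hk1
        · interval_cases k
          simpa using h
        · have hthis := (ih (j+1)).mp (by omega) (k-1) (by omega)
          have e : j + 1 + (k - 1) = j + k := by omega
          rw [e] at hthis
          exact hthis
      · intro hall
        have : m ≤ pvRun ws N (j+1) := by
          apply (ih (j+1)).mpr
          intro k hk
          have hthis := hall (k+1) (by omega)
          have e : j + (k + 1) = j + 1 + k := by omega
          rw [e] at hthis
          exact hthis
        omega
    · rename_i h
      constructor
      · omega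
      · intro hall
        exact absurd (by simpa using hall 0 (by omega)) h

lemma pvCnt_aux (ws : List String) (n : Int) (hn : 1 ≤ n) :
    ∀ m s, s + m = ws.length →
      (List.range' s m).foldr
        (fun (j : Nat) acc =>
          (if (j : Int) + n < (ws.length : Int) ∧
              PySem.List.pyGet? ws (j : Int) = PySem.List.pyGet? ws ((j : Int) + n)
           then acc.headD 0 + 1 else 0) :: acc) [0]
        = (List.range' s m).map (fun j => (pvRun ws n.toNat j : Int)) ++ [0] := by
  intro m
  induction m with
  | zero => intro s _; simp
  | succ m ih =>
    intro s hs
    rw [List.range'_succ, List.foldr_cons, ih (s+1) (by omega), List.map_cons, List.cons_append]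
    congr 1
    have hcast : ((s + n.toNat : Nat) : Int) = (s : Int) + n := by omega
    have hcond : ((s : Int) + n < (ws.length : Int) ∧
        PySem.List.pyGet? ws (s : Int) = PySem.List.pyGet? ws ((s : Int) + n)) ↔
        (s + n.toNat < ws.length ∧ ws[s]? = ws[s + n.toNat]?) := by
      rw [← hcast, PySem.List.pyGet?_natCast, PySem.List.pyGet?_natCast]
      constructor
      · intro hx; exact ⟨by omega, hx.2⟩
      · intro hx; exact ⟨by omega, hx.2⟩
    by_cases hc : s + n.toNat < ws.length ∧ ws[s]? = ws[s + n.toNat]?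
    · have hm : 1 ≤ m := by
        have h1 := hc.1
        omega
      rw [if_pos (hcond.mpr hc)]
      conv_rhs => rw [pvRun]
      rw [dif_pos hc]
      obtain ⟨m', rfl⟩ : ∃ m', m = m' + 1 := ⟨m - 1, by omega⟩
      rw [List.range'_succ]
      simp only [List.map_cons, List.cons_append, List.headD_cons]
      push_cast
      ring
    · rw [if_neg (fun hci => hc (hcond.mp hci))]
      conv_rhs => rw [pvRun]
      rw [dif_neg hc]
      simp

lemma pvCnt_spec (ws : List String) (n : Int) (hn : 1 ≤ n) :
    pvCnt ws n = (List.range ws.length).map (fun j => (pvRun ws n.toNat j : Int)) ++ [0] := by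
  unfold pvCnt
  rw [List.range_eq_range']
  exact pvCnt_aux ws n hn ws.length 0 (by omega)

lemma slice_eq_iff_run (ws : List String) (n a : Int) (hn : 1 ≤ n) (ha : 0 ≤ a)
    (hL : a + 2*n ≤ (ws.length : Int)) :
    (PySem.List.slice ws (some a) (some (a + n)) = PySem.List.slice ws (some (a + n)) (some (a + 2*n))) ↔
      n ≤ (PySem.List.pyGet? (pvCnt ws n) a).getD 0 := by
  have h2 : a.toNat + 2*n.toNat ≤ ws.length := by omega
  have e1 : PySem.List.slice ws (some a) (some (a+n)) = (ws.drop a.toNat).take n.toNat := by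
    rw [PySem.List.slice_toNat ws ha (by omega)]
    have d1 : (a+n).toNat - a.toNat = n.toNat := by omega
    rw [d1]
  have e2 : PySem.List.slice ws (some (a+n)) (some (a+2*n)) = (ws.drop (a.toNat + n.toNat)).take n.toNat := by
    rw [PySem.List.slice_toNat ws (by omega) (by omega)]
    have d1 : (a+n).toNat = a.toNat + n.toNat := by omega
    have d2 : (a+2*n).toNat - (a.toNat + n.toNat) = n.toNat := by omega
    rw [d1, d2]
  have hAL : a.toNat < ((List.range ws.length).map (fun j => (pvRun ws n.toNat j : Int))).length := by
    simp
    omega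
  have ecnt : (PySem.List.pyGet? (pvCnt ws n) a).getD 0 = (pvRun ws n.toNat a.toNat : Int) := by
    rw [PySem.List.pyGet?_of_nonneg (pvCnt ws n) ha, pvCnt_spec ws n hn,
        List.getElem?_append_left hAL]
    have hAr : a.toNat < ws.length := by omega
    simp [hAr]
  rw [e1, e2, ecnt]
  have hext : ((ws.drop a.toNat).take n.toNat = (ws.drop (a.toNat + n.toNat)).take n.toNat) ↔
      ∀ k, k < n.toNat → ws[a.toNat + k]? = ws[a.toNat + n.toNat + k]? := by
    constructor
    · intro h k hk
      have hk2 := congrArg (fun l => l[k]?) h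
      simpa [List.getElem?_drop, hk] using hk2
    · intro h
      apply List.ext_getElem?
      intro k
      by_cases hk : k < n.toNat
      · simp [List.getElem?_drop, hk, h k hk]
      · simp [hk]
  rw [hext]
  have hcast : (n ≤ (pvRun ws n.toNat a.toNat : Int)) ↔ n.toNat ≤ pvRun ws n.toNat a.toNat := by omega
  rw [hcast, pvRun_ge_iff]
  constructor
  · intro h k hk
    refine ⟨by omega, ?_⟩
    have hthis := h k hk
    have e : a.toNat + n.toNat + k = a.toNat + k + n.toNat := by omega
    rw [e] at hthis
    exact hthis
  · intro h k hk
    have hthis := (h k hk).2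
    have e : a.toNat + k + n.toNat = a.toNat + n.toNat + k := by omega
    rw [e] at hthis
    exact hthis

lemma pvInnerB_ge (ws : List String) (cnt : List Int) (n : Int) (hn : 1 ≤ n) :
    ∀ fuel i, i ≤ pvInnerB ws cnt n fuel i := by
  intro fuel
  induction fuel with
  | zero => intro i; simp [pvInnerB]
  | succ f ih =>
    intro i
    simp only [pvInnerB]
    split
    · rename_i h
      exact le_trans (by omega) (ih (i + n))
    · exact le_rfl

lemma pvInner_eq (ws : List String) (n : Int) (hn : 1 ≤ n) :
    ∀ fuel i, n ≤ i → pvInnerA ws n fuel i = pvInnerB ws (pvCnt ws n) n fuel i := by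
  intro fuel
  induction fuel with
  | zero => intro i _; rfl
  | succ f ih =>
    intro i hi
    simp only [pvInnerA, pvInnerB]
    by_cases hL : i + n ≤ (ws.length : Int)
    · have heq := slice_eq_iff_run ws n (i - n) hn (by omega) (by omega)
      have eb1 : i - n + n = i := by ring
      have eb2 : i - n + 2*n = i + n := by ring
      rw [eb1, eb2] at heq
      simp only [heq]
      split
      · exact ih (i + n) (by omega)
      · rfl
    · rw [if_neg (fun hc => hL hc.1), if_neg (fun hc => hL hc.1)]

-- proof-only: whether the scan starting at i ever takes the collapse branch
def pvColl (ws : List String) (cnt : List Int) (n : Int) : Nat → Int → Bool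
  | 0, _ => false
  | fuel+1, i =>
    if i < (ws.length : Int) then
      if i + 2*n ≤ (ws.length : Int) ∧ n ≤ (PySem.List.pyGet? cnt i).getD 0 then true
      else pvColl ws cnt n fuel (i + 1)
    else false

lemma slice_singleton (ws : List String) (i : Int) (h0 : 0 ≤ i) (hL : i < (ws.length : Int)) :
    PySem.List.slice ws (some i) (some (i + 1)) = [(PySem.List.pyGet? ws i).getD ""] := by
  rw [PySem.List.slice_toNat ws h0 (by omega), PySem.List.pyGet?_of_nonneg ws h0]
  have d1 : (i+1).toNat - i.toNat = 1 := by omega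
  have hlt : i.toNat < ws.length := by omega
  rw [d1, List.drop_eq_getElem_cons hlt, List.take_succ_cons, List.take_zero]
  simp [hlt]

lemma slice_len (ws : List String) (i n : Int) (h0 : 0 ≤ i) (hn : 0 ≤ n)
    (hL : i + n ≤ (ws.length : Int)) :
    (PySem.List.slice ws (some i) (some (i + n))).length = n.toNat := by
  rw [PySem.List.slice_toNat ws h0 (by omega)]
  simp only [List.length_take, List.length_drop]
  omega

lemma pvScanA_keepB (ws : List String) (n : Int) (hn : 1 ≤ n) :
    ∀ fuel i out changed, 0 ≤ i →
      pvScanA ws n fuel i out changed =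
        (out ++ (pvKeepB ws (pvCnt ws n) n fuel i).flatMap
            (fun p => PySem.List.slice ws (some p.1) (some p.2)),
         changed || pvColl ws (pvCnt ws n) n fuel i) := by
  intro fuel
  induction fuel with
  | zero => intro i out changed _; simp [pvScanA, pvKeepB, pvColl]
  | succ f ih =>
    intro i out changed hi
    simp only [pvScanA, pvKeepB, pvColl]
    by_cases hIL : i < (ws.length : Int)
    · rw [if_pos hIL, if_pos hIL, if_pos hIL]
      by_cases h2 : i + 2*n ≤ (ws.length : Int)
      · have heq := slice_eq_iff_run ws n i hn hi h2
        simp only [heq]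
        by_cases hc : i + 2*n ≤ (ws.length : Int) ∧ n ≤ (PySem.List.pyGet? (pvCnt ws n) i).getD 0
        · rw [if_pos hc, if_pos hc, if_pos hc]
          rw [pvInner_eq ws n hn (ws.length + 1) (i + 2*n) (by omega)]
          have hge := pvInnerB_ge ws (pvCnt ws n) n hn (ws.length + 1) (i + 2*n)
          rw [ih _ _ _ (by omega)]
          simp [List.flatMap_cons, List.append_assoc]
        · rw [if_neg hc, if_neg hc, if_neg hc]
          rw [ih _ _ _ (by omega)]
          simp [List.flatMap_cons, List.append_assoc, slice_singleton ws i hi hIL]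
      · rw [if_neg (fun hc => h2 hc.1), if_neg (fun hc => h2 hc.1), if_neg (fun hc => h2 hc.1)]
        rw [ih _ _ _ (by omega)]
        simp [List.flatMap_cons, List.append_assoc, slice_singleton ws i hi hIL]
    · rw [if_neg hIL, if_neg hIL, if_neg hIL]
      simp

lemma pvKeepB_len (ws : List String) (n : Int) (hn : 1 ≤ n) (cnt : List Int) :
    ∀ fuel i, 0 ≤ i →
      ((pvKeepB ws cnt n fuel i).flatMap
          (fun p => PySem.List.slice ws (some p.1) (some p.2))).length ≤ ws.length - i.toNat := by
  intro fuel
  induction fuel with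
  | zero => intro i _; simp [pvKeepB]
  | succ f ih =>
    intro i hi
    simp only [pvKeepB]
    by_cases hIL : i < (ws.length : Int)
    · rw [if_pos hIL]
      by_cases hc : i + 2*n ≤ (ws.length : Int) ∧ n ≤ (PySem.List.pyGet? cnt i).getD 0
      · rw [if_pos hc]
        have hge := pvInnerB_ge ws cnt n hn (ws.length + 1) (i + 2*n)
        have hrest := ih (pvInnerB ws cnt n (ws.length + 1) (i + 2*n)) (by omega)
        have hsl := slice_len ws i n hi (by omega) (by omega)
        simp only [List.flatMap_cons, List.length_append, hsl]
        omega
      · rw [if_neg hc]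
        have hrest := ih (i + 1) (by omega)
        have hsl := slice_len ws i 1 hi (by omega) (by omega)
        simp only [List.flatMap_cons, List.length_append, hsl]
        omega
    · rw [if_neg hIL]
      simp

lemma pvColl_strict (ws : List String) (n : Int) (hn : 1 ≤ n) (cnt : List Int) :
    ∀ fuel i, 0 ≤ i → pvColl ws cnt n fuel i = true →
      ((pvKeepB ws cnt n fuel i).flatMap
          (fun p => PySem.List.slice ws (some p.1) (some p.2))).length < ws.length - i.toNat := by
  intro fuel
  induction fuel with
  | zero => intro i _ h; simp [pvColl] at h
  | succ f ih =>
    intro i hi h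
    simp only [pvColl] at h
    simp only [pvKeepB]
    by_cases hIL : i < (ws.length : Int)
    · rw [if_pos hIL] at h ⊢
      by_cases hc : i + 2*n ≤ (ws.length : Int) ∧ n ≤ (PySem.List.pyGet? cnt i).getD 0
      · rw [if_pos hc]
        have hge := pvInnerB_ge ws cnt n hn (ws.length + 1) (i + 2*n)
        have hrest := pvKeepB_len ws n hn cnt f (pvInnerB ws cnt n (ws.length + 1) (i + 2*n)) (by omega)
        have hsl := slice_len ws i n hi (by omega) (by omega)
        simp only [List.flatMap_cons, List.length_append, hsl]
        omega
      · rw [if_neg hc] at h ⊢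
        have hrest := ih (i + 1) (by omega) h
        have hsl := slice_len ws i 1 hi (by omega) (by omega)
        simp only [List.flatMap_cons, List.length_append, hsl]
        omega
    · rw [if_neg hIL] at h
      simp at h

lemma pvColl_false_drop (ws : List String) (n : Int) (cnt : List Int) :
    ∀ (fuel : Nat) (i : Int), 0 ≤ i → (ws.length : Int) ≤ i + (fuel : Int) → pvColl ws cnt n fuel i = false →
      (pvKeepB ws cnt n fuel i).flatMap
          (fun p => PySem.List.slice ws (some p.1) (some p.2)) = ws.drop i.toNat := by
  intro fuel
  induction fuel with
  | zero =>
    intro i hi hf _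
    have : ws.length ≤ i.toNat := by omega
    simp [pvKeepB, List.drop_eq_nil_of_le this]
  | succ f ih =>
    intro i hi hf h
    simp only [pvColl] at h
    simp only [pvKeepB]
    by_cases hIL : i < (ws.length : Int)
    · rw [if_pos hIL] at h ⊢
      by_cases hc : i + 2*n ≤ (ws.length : Int) ∧ n ≤ (PySem.List.pyGet? cnt i).getD 0
      · rw [if_pos hc] at h
        simp at h
      · rw [if_neg hc] at h ⊢
        rw [List.flatMap_cons, ih (i + 1) (by omega) (by omega) h,
            slice_singleton ws i hi hIL]
        have hlt : i.toNat < ws.length := by omega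
        rw [PySem.List.pyGet?_of_nonneg ws hi]
        have e : (i + 1).toNat = i.toNat + 1 := by omega
        rw [e, List.drop_eq_getElem_cons hlt]
        simp [hlt]
    · rw [if_neg hIL]
      have : ws.length ≤ i.toNat := by omega
      simp [List.drop_eq_nil_of_le this]

lemma pvPassB_len (ws : List String) (n : Int) (hn : 1 ≤ n) :
    (pvPassB ws n).length ≤ ws.length := by
  have h := pvKeepB_len ws n hn (pvCnt ws n) (ws.length + 1) 0 le_rfl
  simpa [pvPassB] using h

lemma pvFoldB_len (ns : List Int) :
    ∀ ws, (∀ m ∈ ns, 1 ≤ m) → (ns.foldl (fun w n => pvPassB w n) ws).length ≤ ws.length := by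
  induction ns with
  | nil => intro ws _; simp
  | cons n ns ih =>
    intro ws hm
    simp only [List.foldl_cons]
    exact le_trans (ih (pvPassB ws n) (fun m hm2 => hm m (List.mem_cons_of_mem _ hm2)))
      (pvPassB_len ws n (hm n List.mem_cons_self))

lemma pvScanA_pass (ws : List String) (n : Int) (hn : 1 ≤ n) (c : Bool) :
    pvScanA ws n (ws.length + 1) 0 [] c =
      (pvPassB ws n, c || pvColl ws (pvCnt ws n) n (ws.length + 1) 0) := by
  rw [pvScanA_keepB ws n hn (ws.length + 1) 0 [] c le_rfl]
  simp [pvPassB]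

lemma pvPassB_cases (ws : List String) (n : Int) (hn : 1 ≤ n) :
    (pvColl ws (pvCnt ws n) n (ws.length + 1) 0 = false ∧ pvPassB ws n = ws) ∨
    (pvColl ws (pvCnt ws n) n (ws.length + 1) 0 = true ∧ (pvPassB ws n).length < ws.length) := by
  by_cases h : pvColl ws (pvCnt ws n) n (ws.length + 1) 0 = true
  · right
    refine ⟨h, ?_⟩
    have := pvColl_strict ws n hn (pvCnt ws n) (ws.length + 1) 0 le_rfl h
    simpa [pvPassB] using this
  · left
    have hf : pvColl ws (pvCnt ws n) n (ws.length + 1) 0 = false := by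
      cases hx : pvColl ws (pvCnt ws n) n (ws.length + 1) 0
      · rfl
      · exact absurd hx h
    refine ⟨hf, ?_⟩
    have := pvColl_false_drop ws n (pvCnt ws n) (ws.length + 1) 0 le_rfl (by omega) hf
    simpa [pvPassB] using this

lemma pvFoldA_eq (ns : List Int) :
    ∀ ws (c : Bool), (∀ m ∈ ns, 1 ≤ m) →
      ns.foldl (fun st n => pvScanA st.1 n (st.1.length + 1) 0 [] st.2) (ws, c)
        = (ns.foldl (fun w n => pvPassB w n) ws,
           c || decide (ns.foldl (fun w n => pvPassB w n) ws ≠ ws)) := by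
  induction ns with
  | nil => intro ws c _; simp
  | cons n ns ih =>
    intro ws c hm
    have hn : 1 ≤ n := hm n List.mem_cons_self
    have hm' : ∀ m ∈ ns, 1 ≤ m := fun m hm2 => hm m (List.mem_cons_of_mem _ hm2)
    simp only [List.foldl_cons]
    rw [pvScanA_pass ws n hn c,
        ih (pvPassB ws n) (c || pvColl ws (pvCnt ws n) n (ws.length + 1) 0) hm']
    rcases pvPassB_cases ws n hn with ⟨hcf, hpe⟩ | ⟨hct, hlt⟩
    · rw [hcf]
      simp [hpe]
    · rw [hct]
      have hne : ns.foldl (fun w n => pvPassB w n) (pvPassB ws n) ≠ ws := by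
        intro he
        have := pvFoldB_len ns (pvPassB ws n) hm'
        rw [he] at this
        omega
      simp [hne]

lemma pvSweep_eq (maxn : Int) (ws : List String) :
    pvSweepA maxn (ws, false) = (pvSweepB maxn ws, decide (pvSweepB maxn ws ≠ ws)) := by
  unfold pvSweepA pvSweepB
  rw [pvFoldA_eq (PySem.List.pyRange maxn 1 (-1)) ws false ?hm]
  · simp
  · intro m hm
    have := (PySem.List.mem_pyRange_neg_one).mp hm
    omega

lemma pvLoop_eq (maxn : Int) : ∀ fuel ws, pvLoopA maxn fuel ws = pvLoopB maxn fuel ws := by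
  intro fuel
  induction fuel with
  | zero => intro ws; rfl
  | succ f ih =>
    intro ws
    simp only [pvLoopA, pvLoopB, pvSweep_eq]
    by_cases h : pvSweepB maxn ws = ws
    · simp [h]
    · simp [h, ih]

-- ===== VERDICT (by name: the statement is the Claim_ definition above) =====
theorem dedupe_ngrams_spec : Claim_equal_dedupe_ngrams := by
  intro words max_n _
  unfold Spec_dedupe_ngrams dedupe_ngrams dedupe_ngrams_alt
  exact pvLoop_eq max_n (words.length + 2) words
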